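-- pv_equiv track=rewrite | github.com/sschott20/Competitive-Programming | Educational Codeforces Round 160 (Rated for Div. 2)/B.py | solve
-- ===== SOURCE A (Python) =====
-- def solve(test):
--     zeroes = 0
--     ones = 0
--
--     for i in test:
--         if i == "0":
--             zeroes += 1
--         else:
--             ones += 1
--     if zeroes == ones:
--         return 0
--     if len(test) == 1:
--         return 1
--
--     for i in range(len(test)):
--         if test[i] == "1":
--             zeroes -= 1
--         else:
--             ones -= 1
--             # if zeroes <= 0:
--             #     for j in range(i, len(test)):
--             #         if test[j] == "1":
--             #             ones -= 1
--         if zeroes < 0 or ones < 0: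
--             return len(test) - i
-- ===== SOURCE B (Python) =====
-- def solve(test):
--     zeroes = sum(c == "0" for c in test)
--     ones = len(test) - zeroes
--     if zeroes == ones:
--         return 0
--     if len(test) == 1:
--         return 1
--     ones_idx = [i for i, c in enumerate(test) if c == "1"]
--     non1_idx = [i for i, c in enumerate(test) if c != "1"]
--     p1 = ones_idx[zeroes] if zeroes < len(ones_idx) else None
--     p2 = non1_idx[ones] if ones < len(non1_idx) else None
--     candidates = [p for p in (p1, p2) if p is not None]
--     if candidates:
--         return len(test) - min(candidates)
-- ===== Notes on version B (the rewrite author's own statement) =====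
-- stated objective: alternative
-- what changed: Replaces A's interleaved decrement scan (second loop) by computing totals with str.count and directly indexing the (zeroes+1)-th '1' and the (ones+1)-th non-'1' position in precomputed index lists, taking their minimum.
import Mathlib
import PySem

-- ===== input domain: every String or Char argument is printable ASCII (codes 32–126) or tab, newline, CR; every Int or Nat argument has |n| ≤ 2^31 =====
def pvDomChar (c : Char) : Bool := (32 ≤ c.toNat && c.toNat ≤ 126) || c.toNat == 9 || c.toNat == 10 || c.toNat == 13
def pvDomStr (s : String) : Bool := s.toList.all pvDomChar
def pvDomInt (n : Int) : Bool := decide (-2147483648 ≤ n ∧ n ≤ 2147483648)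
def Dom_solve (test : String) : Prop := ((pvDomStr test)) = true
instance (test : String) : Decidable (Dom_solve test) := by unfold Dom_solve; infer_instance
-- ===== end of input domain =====

-- B replaces A's interleaved decrement scan by totals plus direct lookup of the first
-- threshold-crossing index in precomputed index lists (alternative decomposition, same cost).

-- ===== PORT A =====
-- second loop of A: per-step decrements with an early return
def solveLoop : List Char → Int → Int → Int → Int → Option Int
  | [], _i, _n, _zeroes, _ones => none
  | c :: rest, i, n, zeroes, ones =>
    let z' := if c == '1' then zeroes - 1 else zeroes
    let o' := if c == '1' then ones else ones - 1
    if z' < 0 ∨ o' < 0 then some (n - i) else solveLoop rest (i + 1) n z' o'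

def solve (test : String) : Option Int :=
  let chars := test.toList
  let zo := chars.foldl
    (fun (p : Int × Int) i => if i == '0' then (p.1 + 1, p.2) else (p.1, p.2 + 1)) (0, 0)
  if zo.1 = zo.2 then some 0
  else if chars.length = 1 then some 1
  else solveLoop chars 0 (chars.length : Int) zo.1 zo.2

-- ===== PORT B =====
def solve_alt (test : String) : Option Int :=
  let chars := test.toList
  let zeroes := (chars.map (fun c => if c == '0' then (1 : Int) else 0)).sum
  let ones := (chars.length : Int) - zeroes
  if zeroes = ones then some 0
  else if chars.length = 1 then some 1
  else
    let onesIdx := ((PySem.List.enumerate chars 0).filter (fun p => p.2 == '1')).map (fun p => p.1)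
    let non1Idx := ((PySem.List.enumerate chars 0).filter (fun p => !(p.2 == '1'))).map (fun p => p.1)
    let p1 := if zeroes < (onesIdx.length : Int) then PySem.List.pyGet? onesIdx zeroes else none
    let p2 := if ones < (non1Idx.length : Int) then PySem.List.pyGet? non1Idx ones else none
    match p1, p2 with
    | none, none => none
    | some a, none => some ((chars.length : Int) - a)
    | none, some b => some ((chars.length : Int) - b)
    | some a, some b => some ((chars.length : Int) - min a b)

-- ===== PRECONDITION & SPEC =====
def Spec_solve (test : String) (out : Option Int) : Prop := out = solve_alt test
instance (test : String) (out : Option Int) : Decidable (Spec_solve test out) := by unfold Spec_solve; infer_instance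

-- ===== CLAIM (what is proved, stated in full; the proofs are below) =====
def Claim_equal_solve : Prop := ∀ (test : String), Dom_solve test → Spec_solve test (solve test)

-- ===== LEMMAS AND PROOFS =====

-- indices (as Python ints, offset s) of the characters satisfying p
def fIdx (p : Char → Bool) (s : Int) : List Char → List Int
  | [] => []
  | c :: rest => if p c then s :: fIdx p (s + 1) rest else fIdx p (s + 1) rest

theorem fIdx_enum (p : Char → Bool) (l : List Char) (s : Int) :
    ((PySem.List.enumerate l s).filter (fun q => p q.2)).map (fun q => q.1) = fIdx p s l := by
  induction l generalizing s with
  | nil => simp [PySem.List.enumerate_nil, fIdx]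
  | cons c rest ih =>
    simp only [PySem.List.enumerate_cons, List.filter_cons, fIdx]
    by_cases hc : p c <;> simp [hc, ih]

theorem fIdx_ge (p : Char → Bool) (l : List Char) (s : Int) :
    ∀ x ∈ fIdx p s l, s ≤ x := by
  induction l generalizing s with
  | nil => simp [fIdx]
  | cons c rest ih =>
    intro x hx
    by_cases hc : p c
    · simp only [fIdx, hc, if_true, List.mem_cons] at hx
      rcases hx with rfl | hx
      · omega
      · have := ih (s + 1) x hx; omega
    · simp only [fIdx, hc, if_false] at hx
      have := ih (s + 1) x hx; omega

-- A's loop equals "first threshold-crossing index" extracted from the index lists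
theorem loop_eq (l : List Char) (z o : Nat) (i n : Int) :
    solveLoop l i n (z : Int) (o : Int) =
      (match (fIdx (fun c => c == '1') i l)[z]?, (fIdx (fun c => !(c == '1')) i l)[o]? with
       | none, none => none
       | some a, none => some (n - a)
       | none, some b => some (n - b)
       | some a, some b => some (n - min a b)) := by
  induction l generalizing z o i with
  | nil => simp [solveLoop, fIdx]
  | cons c rest ih =>
    by_cases hc : c == '1'
    · cases z with
      | zero =>
        have hcond : ((0 : Int) - 1 < 0 ∨ (o : Int) < 0) := by omega
        simp only [solveLoop, hc, if_true, Nat.cast_zero, hcond, if_pos]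
        simp only [fIdx, hc, Bool.not_true, if_true, if_false, List.getElem?_cons_zero]
        rcases h2 : (fIdx (fun c => !(c == '1')) (i + 1) rest)[o]? with _ | b
        · simp [h2]
        · have hb : i + 1 ≤ b := fIdx_ge _ _ _ b (List.mem_of_getElem? h2)
          have : min i b = i := by omega
          simp [h2, this]
      | succ z' =>
        have hcond : ¬ (((z' + 1 : Nat) : Int) - 1 < 0 ∨ (o : Int) < 0) := by
          push_cast; omega
        have hz : ((z' + 1 : Nat) : Int) - 1 = (z' : Int) := by push_cast; omega
        simp only [solveLoop, hc, if_true, hz]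
        rw [if_neg (by push_cast; omega : ¬ ((z' : Int) < 0 ∨ (o : Int) < 0)), ih z' o (i + 1)]
        simp [fIdx, hc]
    · cases o with
      | zero =>
        have hcond : ((z : Int) < 0 ∨ (0 : Int) - 1 < 0) := by omega
        simp only [solveLoop, hc, if_false, Nat.cast_zero, hcond, if_pos]
        simp only [fIdx, hc, Bool.not_false, if_true, if_false, List.getElem?_cons_zero]
        rcases h1 : (fIdx (fun c => c == '1') (i + 1) rest)[z]? with _ | a
        · simp [h1]
        · have ha : i + 1 ≤ a := fIdx_ge _ _ _ a (List.mem_of_getElem? h1)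
          have : min a i = i := by omega
          simp [h1, this]
      | succ o' =>
        have hcond : ¬ ((z : Int) < 0 ∨ ((o' + 1 : Nat) : Int) - 1 < 0) := by
          push_cast; omega
        have ho : ((o' + 1 : Nat) : Int) - 1 = (o' : Int) := by push_cast; omega
        simp only [solveLoop, hc, Bool.false_eq_true, if_false, ho]
        rw [if_neg (by push_cast; omega : ¬ ((z : Int) < 0 ∨ (o' : Int) < 0)), ih z o' (i + 1)]
        simp [fIdx, hc]

-- A's counting fold
theorem fold_count (l : List Char) (a b : Int) :
    l.foldl (fun (p : Int × Int) i => if i == '0' then (p.1 + 1, p.2) else (p.1, p.2 + 1)) (a, b)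
      = (a + (l.countP (fun c => c == '0') : Int), b + (l.countP (fun c => !(c == '0')) : Int)) := by
  induction l generalizing a b with
  | nil => simp
  | cons c rest ih =>
    simp only [List.foldl_cons]
    by_cases hc : c == '0'
    · rw [if_pos hc, ih]
      have h1 : List.countP (fun c => c == '0') (c :: rest)
          = List.countP (fun c => c == '0') rest + 1 := by simp [List.countP_cons, hc]
      have h2 : List.countP (fun c => !(c == '0')) (c :: rest)
          = List.countP (fun c => !(c == '0')) rest := by simp [List.countP_cons, hc]
      rw [h1, h2]; simp only [Prod.mk.injEq]; constructor <;> push_cast <;> ring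
    · rw [if_neg hc, ih]
      have h1 : List.countP (fun c => c == '0') (c :: rest)
          = List.countP (fun c => c == '0') rest := by simp [List.countP_cons, hc]
      have h2 : List.countP (fun c => !(c == '0')) (c :: rest)
          = List.countP (fun c => !(c == '0')) rest + 1 := by simp [List.countP_cons, hc]
      rw [h1, h2]; simp only [Prod.mk.injEq]; constructor <;> push_cast <;> ring

-- B's 0/1 sum is the same count
theorem sum_count (l : List Char) :
    (l.map (fun c => if c == '0' then (1 : Int) else 0)).sum = (l.countP (fun c => c == '0') : Int) := by
  induction l with
  | nil => simp
  | cons c rest ih =>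
    simp only [List.map_cons, List.sum_cons]
    by_cases hc : c == '0'
    · have h1 : List.countP (fun c => c == '0') (c :: rest)
          = List.countP (fun c => c == '0') rest + 1 := by simp [List.countP_cons, hc]
      rw [if_pos hc, ih, h1]; push_cast; ring
    · have h1 : List.countP (fun c => c == '0') (c :: rest)
          = List.countP (fun c => c == '0') rest := by simp [List.countP_cons, hc]
      rw [if_neg hc, ih, h1]; push_cast; ring

theorem countP_not_eq (l : List Char) (p : Char → Bool) :
    l.countP (fun c => !(p c)) = l.length - l.countP p := by
  induction l with
  | nil => simp
  | cons c rest ih =>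
    by_cases hc : p c <;> simp [hc, List.countP_cons, ih] <;>
      have := List.countP_le_length (p := p) (l := rest) <;> omega

-- "if k < len then pyGet? xs k else none" with a Nat k is just xs[k]?
theorem pyGetGuard (xs : List Int) (k : Nat) :
    (if (k : Int) < (xs.length : Int) then PySem.List.pyGet? xs (k : Int) else none) = xs[k]? := by
  by_cases h : k < xs.length
  · rw [if_pos (by exact_mod_cast h)]
    simp [PySem.List.pyGet?_natCast]
  · rw [if_neg (by omega), eq_comm, List.getElem?_eq_none_iff]
    omega

-- ===== VERDICT (by name: the statement is the Claim_ definition above) =====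
theorem solve_spec : Claim_equal_solve := by
  intro test _
  unfold Spec_solve solve solve_alt
  simp only [fold_count, sum_count]
  set chars := test.toList with hchars
  set c0 := chars.countP (fun c => c == '0') with hc0
  have hle : c0 ≤ chars.length := List.countP_le_length
  have hnot : chars.countP (fun c => !(c == '0')) = chars.length - c0 := countP_not_eq _ _
  simp only [hnot, zero_add]
  have hcond : ((c0 : Int) = ((chars.length - c0 : Nat) : Int)) ↔
      ((c0 : Int) = (chars.length : Int) - (c0 : Int)) := by
    constructor <;> intro h <;> omega
  by_cases heq : (c0 : Int) = (chars.length : Int) - (c0 : Int)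
  · rw [if_pos (by omega), if_pos heq]
  · rw [if_neg (by omega), if_neg heq]
    by_cases h1 : chars.length = 1
    · rw [if_pos h1, if_pos h1]
    · rw [if_neg h1, if_neg h1]
      have hlen : (chars.length : Int) - (c0 : Int) = ((chars.length - c0 : Nat) : Int) := by omega
      rw [hlen, loop_eq chars c0 (chars.length - c0) 0 (chars.length : Int)]
      rw [fIdx_enum (fun c => c == '1') chars 0, fIdx_enum (fun c => !(c == '1')) chars 0,
        pyGetGuard, pyGetGuard]
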